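-- pv_equiv track=rewrite | github.com/JRStrikwerda/AdventOfCode | src/challenges/2025/day03/solution.py | find_max_joltage_part2
-- ===== SOURCE A (Python) =====
-- def find_max_joltage_part2(bank: str, num_batteries: int = 12) -> int:
--     """
--     Find the maximum joltage by selecting exactly num_batteries from a bank.
--     Strategy: Remove digits greedily to maximize the resulting number.
--     This is the "remove k digits to get maximum number" problem.
--     """
--     digits_to_remove = len(bank) - num_batteries
--     stack = []
--
--     for digit in bank:
--         # Remove smaller digits from the end while we can
--         while stack and digits_to_remove > 0 and stack[-1] < digit:
--             stack.pop()
--             digits_to_remove -= 1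
--         stack.append(digit)
--
--     # If we still need to remove digits, remove from the end
--     while digits_to_remove > 0:
--         stack.pop()
--         digits_to_remove -= 1
--
--     result = "".join(stack)
--     return int(result)
-- ===== SOURCE B (Python) =====
-- def find_max_joltage_part2(bank: str, num_batteries: int = 12) -> int:
--     # Greedy window selection: pick each kept digit as the first maximum of the
--     # feasible window, instead of A's stack-with-removal-budget algorithm.
--     k = min(num_batteries, len(bank))
--     s = bank
--     chosen = []
--     while k > 0:
--         window = s[: len(s) - k + 1]
--         j = window.index(max(window))
--         chosen.append(s[j])
--         s = s[j + 1:]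
--         k -= 1
--     return int("".join(chosen))
-- ===== Notes on version B (the rewrite author's own statement) =====
-- stated objective: alternative
-- what changed: A's single-pass stack with a removal budget is replaced by greedy window selection: each kept digit is chosen as the first maximum of the still-feasible window and the scan restarts after it.
-- outside the precondition, e.g. on find_max_joltage_part2('+1', 1): A returns 1, B returns 1; on find_max_joltage_part2('12', 0): A raises ValueError, B raises ValueError; on find_max_joltage_part2('ab', 1): A raises ValueError, B raises ValueError
import Mathlib
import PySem

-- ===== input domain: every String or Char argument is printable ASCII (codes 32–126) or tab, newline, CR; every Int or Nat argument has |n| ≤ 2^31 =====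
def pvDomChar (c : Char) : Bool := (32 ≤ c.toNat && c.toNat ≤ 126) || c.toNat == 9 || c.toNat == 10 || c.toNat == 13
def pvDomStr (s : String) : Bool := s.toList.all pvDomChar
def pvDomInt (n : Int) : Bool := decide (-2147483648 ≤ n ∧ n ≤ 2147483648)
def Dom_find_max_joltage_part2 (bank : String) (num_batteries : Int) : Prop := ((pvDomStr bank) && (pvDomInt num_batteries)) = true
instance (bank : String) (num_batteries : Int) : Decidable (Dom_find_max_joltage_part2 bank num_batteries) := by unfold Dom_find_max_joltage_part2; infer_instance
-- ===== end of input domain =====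

-- B replaces A's budgeted stack pass by greedy first-max-in-window selection; equal output proved on nonempty all-digit banks with num_batteries ≥ 1.

-- ===== PORT A =====
-- Python's stack is kept top-first (head = stack[-1]); append = cons, pop = tail,
-- "".join(stack) = String.mk of the reverse.

-- the inner 'while stack and digits_to_remove > 0 and stack[-1] < digit' loop
def popA (c : Char) : List Char → Int → List Char × Int
  | [], r => ([], r)
  | t :: st, r => if 0 < r ∧ t < c then popA c st (r - 1) else (t :: st, r)

-- one iteration of 'for digit in bank' (pop phase, then stack.append(digit))
def stepA (p : List Char × Int) (c : Char) : List Char × Int :=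
  let q := popA c p.1 p.2
  (c :: q.1, q.2)

def runA (xs : List Char) (p : List Char × Int) : List Char × Int := xs.foldl stepA p

-- the trailing 'while digits_to_remove > 0: stack.pop()' loop (pop = tail on the top-first stack)
def popLoopA : List Char → Nat → List Char
  | st, 0 => st
  | st, n + 1 => popLoopA st.tail n

-- stack/budget core shared by the two phases of A
def coreA (l : List Char) (r : Int) : List Char :=
  let p := runA l ([], r)
  (popLoopA p.1 p.2.toNat).reverse

def find_max_joltage_part2 (bank : String) (num_batteries : Int) : Int :=
  let l := bank.toList
  let result := String.mk (coreA l ((l.length : Int) - num_batteries))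
  (PySem.Int.ofStr? result).getD 0  -- int(result); none = ValueError, excluded by Pre_

-- ===== PORT B =====
-- 'while k > 0' loop of Source B, recursing on the remaining count k and the suffix s
def pickB : List Char → Nat → List Char
  | _, 0 => []
  | s, k + 1 =>
    let w := s.take (s.length - k)            -- window = s[: len(s) - k + 1] (here k+1 kept)
    match PySem.List.max? w (fun y => y) with
    | none => []                              -- max([]) raises ValueError; unreachable under Pre_
    | some m =>
      let j := (PySem.List.index? w m).getD 0 -- window.index(max(window))
      m :: pickB (s.drop (j + 1)) k

def find_max_joltage_part2_alt (bank : String) (num_batteries : Int) : Int :=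
  let s := bank.toList
  let k := (min num_batteries (s.length : Int)).toNat
  (PySem.Int.ofStr? (String.mk (pickB s k))).getD 0

-- ===== PRECONDITION & SPEC =====
-- Pre_ admits the puzzle's natural domain — a nonempty all-digit bank with num_batteries ≥ 1 —
-- plus the no-removal case num_batteries ≥ len(bank) for any int()-parseable bank. Outside it A
-- raises on almost every input (int('') / int of a non-digit selection = ValueError, pop from an
-- empty stack for negative num_batteries = IndexError); the few non-digit banks whose selected
-- proper subsequence still parses (signs/whitespace/underscores) are excluded with it, and A = B
-- on them too (see cites).
def Pre_find_max_joltage_part2 (bank : String) (num_batteries : Int) : Prop :=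
  1 ≤ num_batteries ∧ bank.toList ≠ [] ∧
    ((bank.toList.all fun c => PySem.Str.isdigit c) = true ∨
      ((bank.toList.length : Int) ≤ num_batteries ∧ PySem.Int.ofStr? bank ≠ none))
instance (bank : String) (num_batteries : Int) : Decidable (Pre_find_max_joltage_part2 bank num_batteries) := by
  unfold Pre_find_max_joltage_part2; infer_instance

def pvWitness_find_max_joltage_part2 : String × Int := ("9274", 2)

def Spec_find_max_joltage_part2 (bank : String) (num_batteries : Int) (out : Int) : Prop := out = find_max_joltage_part2_alt bank num_batteries
instance (bank : String) (num_batteries : Int) (out : Int) : Decidable (Spec_find_max_joltage_part2 bank num_batteries out) := by unfold Spec_find_max_joltage_part2; infer_instance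

-- ===== CLAIM (what is proved, stated in full; the proofs are below) =====
def Claim_equal_find_max_joltage_part2 : Prop := ∀ (bank : String) (num_batteries : Int), Dom_find_max_joltage_part2 bank num_batteries → Pre_find_max_joltage_part2 bank num_batteries → Spec_find_max_joltage_part2 bank num_batteries (find_max_joltage_part2 bank num_batteries)

-- ===== LEMMAS AND PROOFS =====

theorem popA_nonpos (c : Char) (st : List Char) (r : Int) (h : r ≤ 0) :
    popA c st r = (st, r) := by
  cases st with
  | nil => rfl
  | cons t st => simp only [popA]; rw [if_neg]; rintro ⟨h1, _⟩; omega

theorem runA_nonpos (xs : List Char) (st : List Char) (r : Int) (h : r ≤ 0) :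
    runA xs (st, r) = (xs.reverse ++ st, r) := by
  induction xs generalizing st with
  | nil => simp [runA]
  | cons c xs ih =>
    simp only [runA, List.foldl_cons] at *
    rw [show stepA (st, r) c = (c :: st, r) by simp [stepA, popA_nonpos c st r h]]
    rw [ih (c :: st)]; simp

theorem runA_append (as bs : List Char) (p : List Char × Int) :
    runA (as ++ bs) p = runA bs (runA as p) := by
  simp [runA]

theorem pickB_full (s : List Char) : pickB s s.length = s := by
  induction s with
  | nil => rfl
  | cons c t ih =>
    show pickB (c :: t) (t.length + 1) = c :: t
    have h1 : t.length + 1 - t.length = 1 := by omega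
    simp only [pickB, List.length_cons, h1, List.take_succ_cons, List.take_zero,
      PySem.List.max?_id_cons, List.foldl_nil, PySem.List.index?_cons_self, Option.getD_some,
      List.drop_succ_cons, List.drop_zero, ih]

theorem popA_count (c : Char) (st : List Char) (r : Int) :
    ((popA c st r).2 : Int) - (popA c st r).1.length = r - st.length := by
  induction st generalizing r with
  | nil => simp [popA]
  | cons t st ih =>
    simp only [popA]
    split
    · have := ih (r - 1); simp only [List.length_cons] at *; push_cast at *; omega
    · simp

theorem popA_ample (c : Char) (st : List Char) (r : Int) (h : (st.length : Int) ≤ r) :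
    popA c st r = (st.dropWhile (fun t => decide (t < c)),
      r - st.length + (st.dropWhile (fun t => decide (t < c))).length) := by
  induction st generalizing r with
  | nil => simp [popA]
  | cons t st ih =>
    simp only [popA, List.dropWhile_cons]
    by_cases htc : t < c
    · rw [if_pos ⟨by simp at h; omega, htc⟩, ih (r - 1) (by simp at h ⊢; omega)]
      simp [htc]; push_cast; ring_nf
    · rw [if_neg (by rintro ⟨_, hc⟩; exact htc hc)]
      simp [htc]

theorem sorted_dropWhile_lt (x : Char) (st : List Char) (hs : List.Pairwise (· ≤ ·) st) :
    ∀ y ∈ st.dropWhile (fun t => decide (t < x)), x ≤ y := by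
  induction st with
  | nil => simp
  | cons t st ih =>
    rw [List.pairwise_cons] at hs
    rw [List.dropWhile_cons]
    by_cases htx : t < x
    · simp only [htx, decide_true, if_true]; exact ih hs.2
    · simp only [htx, decide_false, if_false]
      intro y hy
      rcases List.mem_cons.mp hy with rfl | hy
      · exact le_of_not_gt htx
      · exact le_trans (not_lt.mp htx) (hs.1 y hy)

theorem pushmax (m : Char) (xs : List Char) (st : List Char) (r : Int)
    (hxs : ∀ c ∈ xs, c < m) (hst : ∀ c ∈ st, c < m) (hs : List.Pairwise (· ≤ ·) st)
    (hr : (xs.length : Int) + st.length ≤ r) :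
    runA (xs ++ [m]) (st, r) = ([m], r - xs.length - st.length) := by
  induction xs generalizing st r with
  | nil =>
    simp only [runA, List.nil_append, List.foldl_cons, List.foldl_nil, stepA]
    rw [popA_ample m st r (by simp at hr ⊢; omega)]
    rw [List.dropWhile_eq_nil_iff.mpr (fun x hx => by simpa using hst x hx)]
    simp
  | cons x xs ih =>
    have hx : x < m := hxs x List.mem_cons_self
    have hst_le : (st.length : Int) ≤ r := by simp at hr; omega
    rw [List.cons_append, show runA (x :: (xs ++ [m])) (st, r) =
      runA (xs ++ [m]) (stepA (st, r) x) from rfl]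
    rw [show stepA (st, r) x = (x :: st.dropWhile (fun t => decide (t < x)),
      r - st.length + (st.dropWhile (fun t => decide (t < x))).length) by
        simp [stepA, popA_ample x st r hst_le]]
    set st' := st.dropWhile (fun t => decide (t < x)) with hst'
    have hsub : List.Sublist st' st := List.dropWhile_sublist _
    have hlen' : st'.length ≤ st.length := hsub.length_le
    have hm1 : ∀ c ∈ xs, c < m := fun c hc => hxs c (List.mem_cons_of_mem _ hc)
    have hm2 : ∀ c ∈ x :: st', c < m := by
      intro c hc
      rcases List.mem_cons.mp hc with rfl | hc
      · exact hx
      · exact hst c (hsub.subset hc)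
    have hm3 : List.Pairwise (· ≤ ·) (x :: st') :=
      List.pairwise_cons.mpr ⟨sorted_dropWhile_lt x st hs, List.Pairwise.sublist hsub hs⟩
    rw [ih (x :: st') _ hm1 hm2 hm3 (by simp at hr ⊢; omega)]
    simp only [Prod.mk.injEq, List.length_cons, true_and]
    push_cast
    omega

theorem popA_barrier (c m : Char) (st : List Char) (r : Int)
    (h : m < c → r ≤ (st.length : Int)) :
    popA c (st ++ [m]) r = ((popA c st r).1 ++ [m], (popA c st r).2) := by
  induction st generalizing r with
  | nil =>
    simp only [popA, List.nil_append]
    have hc : ¬ (0 < r ∧ m < c) := by rintro ⟨h1, h2⟩; have := h h2; simp at this; omega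
    rw [if_neg hc]
  | cons t st ih =>
    simp only [popA, List.cons_append]
    split
    · exact ih (r - 1) (by intro hm; have := h hm; simp at this ⊢; omega)
    · simp

theorem runA_barrier (m : Char) (xs : List Char) (st : List Char) (r : Int)
    (h : ∀ j (hj : j < xs.length), m < xs[j] → r ≤ (j : Int) + st.length) :
    runA xs (st ++ [m], r) = ((runA xs (st, r)).1 ++ [m], (runA xs (st, r)).2) := by
  induction xs generalizing st r with
  | nil => simp [runA]
  | cons c xs ih =>
    have h0 : m < c → r ≤ (st.length : Int) := fun hm => by
      have := h 0 (by simp) (by simpa using hm); simpa using this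
    rw [show runA (c :: xs) (st ++ [m], r) = runA xs (stepA (st ++ [m], r) c) from rfl,
      show runA (c :: xs) (st, r) = runA xs (stepA (st, r) c) from rfl]
    rw [show stepA (st ++ [m], r) c = ((c :: (popA c st r).1) ++ [m], (popA c st r).2) by
      simp [stepA, popA_barrier c m st r h0]]
    have hcnt := popA_count c st r
    exact ih (c :: (popA c st r).1) (popA c st r).2 (fun j hj hmj => by
      have := h (j + 1) (by simpa using hj) (by simpa using hmj)
      simp only [List.length_cons] at this ⊢
      push_cast at this hcnt ⊢; omega)

theorem runA_count (xs : List Char) (st : List Char) (r : Int) :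
    ((runA xs (st, r)).2 : Int) - (runA xs (st, r)).1.length = r - st.length - xs.length := by
  induction xs generalizing st r with
  | nil => simp [runA]
  | cons c xs ih =>
    simp only [runA, List.foldl_cons] at *
    have hq := popA_count c st r
    rw [show stepA (st, r) c = (c :: (popA c st r).1, (popA c st r).2) from rfl]
    have := ih (c :: (popA c st r).1) (popA c st r).2
    simp at this ⊢; omega

theorem popLoopA_eq_drop (st : List Char) (n : Nat) : popLoopA st n = st.drop n := by
  induction n generalizing st with
  | zero => rfl
  | succ n ih =>
    simp only [popLoopA, ih st.tail]
    cases st <;> simp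

theorem coreA_all (s : List Char) : coreA s (s.length : Int) = [] := by
  have h := runA_count s [] (s.length : Int)
  simp only [List.length_nil, Nat.cast_zero] at h
  simp only [coreA, popLoopA_eq_drop]
  rw [show (runA s ([], (s.length : Int))).2.toNat = (runA s ([], (s.length : Int))).1.length by omega,
    List.drop_length, List.reverse_nil]

theorem main_eq (k : Nat) (s : List Char) (hk1 : 1 ≤ k) (hk2 : k ≤ s.length) :
    coreA s ((s.length : Int) - k) = pickB s k := by
  induction k generalizing s with
  | zero => omega
  | succ k' ih =>
    have hn1 : 1 ≤ s.length := le_trans hk1 hk2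
    set n := s.length with hn
    set r : Nat := n - (k' + 1) with hrdef
    have hbud : (n : Int) - ((k' + 1 : Nat) : Int) = (r : Int) := by push_cast; omega
    have hw_len : n - k' = r + 1 := by omega
    set w := s.take (r + 1) with hw
    have hwlen : w.length = min (r + 1) n := by simp [hw, hn]
    have hwne : w ≠ [] := by
      intro habs
      have := congrArg List.length habs
      simp [hwlen] at this
      omega
    obtain ⟨m, hm⟩ : ∃ m, PySem.List.max? w (fun y => y) = some m := by
      cases hmx : PySem.List.max? w (fun y => y) with
      | none => exact absurd ((PySem.List.max?_eq_none_iff w (fun y => y)).mp hmx) hwne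
      | some m => exact ⟨m, rfl⟩
    have hmmem : m ∈ w := PySem.List.max?_mem hm
    have hmax : ∀ y ∈ w, y ≤ m := PySem.List.max?_isMax hm
    obtain ⟨j, hj⟩ : ∃ j, PySem.List.index? w m = some j :=
      Option.isSome_iff_exists.mp ((PySem.List.index?_isSome_iff w m).mpr hmmem)
    obtain ⟨hjlt, hwj, hfirst⟩ := PySem.List.getElem_of_index?_eq_some hj
    have hjr : j ≤ r := by
      have := hwlen
      omega
    have hjn : j < n := by
      have := hwlen
      omega
    have hjs : j < s.length := by omega
    have hsj : s[j]'hjs = m := by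
      have hww : w[j]'hjlt = s[j]'hjs := by simp [hw, List.getElem_take]
      exact hww.symm.trans hwj
    have hsplit : s = (s.take j ++ [m]) ++ s.drop (j + 1) := by
      conv_lhs => rw [← List.take_append_drop j s, List.drop_eq_getElem_cons (l := s) (by omega)]
      rw [hsj]
      simp
    have hlt : ∀ c ∈ s.take j, c < m := by
      intro c hc
      obtain ⟨i, hi, hci⟩ := List.mem_iff_getElem.mp hc
      have hij : i < j := by simp at hi; omega
      have hiw : i < w.length := by omega
      have his : i < s.length := by omega
      have e1 : w[i]'hiw = s[i]'his := by simp [hw, List.getElem_take]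
      have e2 : (s.take j)[i]'hi = s[i]'his := by simp [List.getElem_take]
      have hwi : w[i]'hiw = c := e1.trans (e2.symm.trans hci)
      have hle : c ≤ m := by rw [← hwi]; exact hmax _ (List.getElem_mem hiw)
      have hne : c ≠ m := by rw [← hwi]; exact hfirst i hij
      exact lt_of_le_of_ne hle hne
    have htake_len : (s.take j).length = j := by rw [List.length_take]; omega
    have h1 : runA (s.take j ++ [m]) ([], (r : Int)) = ([m], (r : Int) - j) := by
      have := pushmax m (s.take j) [] (r : Int) hlt (by simp) (by simp)
        (by rw [htake_len, List.length_nil]; omega)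
      rw [this, htake_len]
      simp
    set b := s.drop (j + 1) with hb
    have hblen : b.length = n - (j + 1) := by simp [hb, hn]
    have h2 : runA s ([], (r : Int)) =
        ((runA b ([], (r : Int) - j)).1 ++ [m], (runA b ([], (r : Int) - j)).2) := by
      conv_lhs => rw [hsplit]
      rw [runA_append, h1]
      refine runA_barrier m b [] ((r : Int) - j) ?_
      intro i hi hmi
      simp only [List.length_nil, Nat.cast_zero, add_zero]
      by_contra hcon
      push_neg at hcon
      have hir : j + 1 + i ≤ r := by omega
      have hiw : j + 1 + i < w.length := by omega
      have hsi : j + 1 + i < s.length := by omega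
      have hbw1 : w[j + 1 + i]'hiw = s[j + 1 + i]'hsi := by simp [hw, List.getElem_take]
      have hbw2 : b[i]'hi = s[j + 1 + i]'hsi := by simp [hb, List.getElem_drop]
      have hle := hmax _ (List.getElem_mem hiw)
      rw [hbw1] at hle
      rw [hbw2] at hmi
      exact absurd hmi (not_lt.mpr hle)
    have hcnt := runA_count b [] ((r : Int) - j)
    set q := runA b ([], (r : Int) - j) with hq
    have hqle : q.2 ≤ (q.1.length : Int) := by
      simp only [List.length_nil, Nat.cast_zero, sub_zero] at hcnt
      have : (b.length : Int) = (n : Int) - (j + 1) := by rw [hblen]; push_cast; omega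
      omega
    have hcore : coreA s (r : Int) = m :: coreA b ((r : Int) - j) := by
      simp only [coreA, h2, ← hq, popLoopA_eq_drop]
      rw [List.drop_append_of_le_length (Int.toNat_le.mpr hqle)]
      simp
    have hpick : pickB s (k' + 1) = m :: pickB b k' := by
      show pickB s (k' + 1) = m :: pickB b k'
      simp only [pickB, ← hn, hw_len, ← hw, hm, hj, Option.getD_some, ← hb]
    rw [hbud, hcore, hpick]
    congr 1
    rcases Nat.eq_zero_or_pos k' with hk0 | hk0
    · subst hk0
      have : (r : Int) - j = (b.length : Int) := by rw [hblen]; push_cast; omega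
      rw [this, coreA_all, pickB]
    · have hkb : k' ≤ b.length := by omega
      have := ih b hk0 hkb
      have hbb : (b.length : Int) - (k' : Int) = (r : Int) - j := by rw [hblen]; push_cast; omega
      rw [hbb] at this
      exact this

-- ===== VERDICT (by name: the statement is the Claim_ definition above) =====
theorem core_eq_pick (l : List Char) (num : Int) (h1 : 1 ≤ num) (h2 : l ≠ []) :
    coreA l ((l.length : Int) - num) = pickB l (min num (l.length : Int)).toNat := by
  have hl : 1 ≤ l.length := List.length_pos_iff.mpr h2
  by_cases hc : (l.length : Int) ≤ num
  · have hb : (l.length : Int) - num ≤ 0 := by omega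
    rw [show min num (l.length : Int) = (l.length : Int) from min_eq_right hc, Int.toNat_natCast,
      pickB_full]
    simp only [coreA, runA_nonpos l [] _ hb, Int.toNat_eq_zero.mpr hb]
    simp [popLoopA]
  · have hnum0 : 0 ≤ num := by omega
    have hk : ((num.toNat : Nat) : Int) = num := Int.toNat_of_nonneg hnum0
    rw [show min num (l.length : Int) = num from min_eq_left (le_of_lt (not_le.mp hc))]
    rw [show (l.length : Int) - num = (l.length : Int) - (num.toNat : Int) by rw [hk]]
    exact main_eq num.toNat l (by omega) (by omega)

theorem find_max_joltage_part2_spec : Claim_equal_find_max_joltage_part2 := by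
  intro bank num _hdom hpre
  obtain ⟨h1, h2, _h3⟩ := hpre
  show find_max_joltage_part2 bank num = find_max_joltage_part2_alt bank num
  show (PySem.Int.ofStr? (String.mk (coreA bank.toList ((bank.toList.length : Int) - num)))).getD 0 =
    (PySem.Int.ofStr? (String.mk (pickB bank.toList (min num (bank.toList.length : Int)).toNat))).getD 0
  rw [core_eq_pick bank.toList num h1 h2]
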